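-- pv_equiv track=rewrite | github.com/Macarious-GK/Compiler | Compiler_Pipline (1,2,3,4,5).py | optimize_ir
-- ===== SOURCE A (Python) =====
-- def optimize_ir(ir_code):
--     optimized_code = []
--     for line in ir_code:
--         # Inline constant assignments
--         if " = " in line:
--             lhs, rhs = line.split(" = ")
--             if rhs.isdigit():  # Direct assignment
--                 optimized_code.append(f"{lhs} = {rhs}")
--             elif lhs in rhs:  # Remove self-assignments
--                 continue
--             else:
--                 optimized_code.append(line)
--         else:
--             optimized_code.append(line)
--
--     # Remove unnecessary gotos to the next line (e.g., redundant jumps)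
--     final_code = []
--     for i, line in enumerate(optimized_code):
--         if "goto" in line and i + 1 < len(optimized_code) and line.split(" ")[1] + ":" == optimized_code[i + 1]:
--             continue
--         final_code.append(line)
--
--     return final_code
-- ===== SOURCE B (Python) =====
-- def optimize_ir(ir_code):
--     # One fused pass: transform each line, emit into a single result list,
--     # and pop a trailing redundant goto when its target label arrives next.
--     result = []
--     for line in ir_code:
--         if " = " in line:
--             lhs, rhs = line.split(" = ")
--             if rhs.isdigit():
--                 out = f"{lhs} = {rhs}"
--             elif lhs in rhs:
--                 continue
--             else:
--                 out = line
--         else: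
--             out = line
--         if result and "goto" in result[-1] and result[-1].split(" ")[1] + ":" == out:
--             result.pop()
--         result.append(out)
--     return result
-- ===== Notes on version B (the rewrite author's own statement) =====
-- stated objective: alternative
-- what changed: A's two passes (build an intermediate optimized_code list, then rescan it with an index+1 lookahead to drop redundant gotos) are fused into one loop that transforms each line and, with a trailing-buffer lookback, pops the previously emitted goto when its target label arrives, so the intermediate list and the second scan disappear.
import Mathlib
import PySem

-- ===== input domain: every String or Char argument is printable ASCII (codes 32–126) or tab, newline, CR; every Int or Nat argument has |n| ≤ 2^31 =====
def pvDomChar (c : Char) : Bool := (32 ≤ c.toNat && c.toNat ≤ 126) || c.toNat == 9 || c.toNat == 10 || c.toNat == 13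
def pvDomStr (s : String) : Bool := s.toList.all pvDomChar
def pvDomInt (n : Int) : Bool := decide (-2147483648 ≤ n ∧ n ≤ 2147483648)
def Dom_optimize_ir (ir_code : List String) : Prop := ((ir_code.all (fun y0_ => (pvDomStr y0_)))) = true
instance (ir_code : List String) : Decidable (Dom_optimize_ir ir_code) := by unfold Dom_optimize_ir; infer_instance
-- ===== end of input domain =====

-- B fuses A's two passes into one loop with a trailing-buffer lookback (pop a redundant goto
-- just before emitting its target label); same return value, objective: alternative decomposition.


-- ===== PORT A =====
-- first pass: inline constant assignments / drop self-assignments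
def pvStepA (acc : List String) (line : String) : List String :=
  if PySem.Str.isIn " = " line then
    match (PySem.Str.split? line " = ").getD [] with   -- sep ≠ "", so split? is `some`
    | [lhs, rhs] =>
      if PySem.Str.strIsdigit rhs then acc ++ [PySem.Str.join "" [lhs, " = ", rhs]]
      else if PySem.Str.isIn lhs rhs then acc
      else acc ++ [line]
    | _ => acc        -- Python: ValueError (unpacking ≠ 2 parts); excluded by Pre_
  else acc ++ [line]

-- second pass: drop a goto whose target label is the next line
def pvStepA2 (optimized_code : List String) (acc : List String) (p : Int × String) : List String :=
  if PySem.Str.isIn "goto" p.2 = true ∧ p.1 + 1 < (optimized_code.length : Int) then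
    match PySem.List.pyGet? ((PySem.Str.split? p.2 " ").getD []) 1 with
    | some t =>
      if some (PySem.Str.join "" [t, ":"]) = PySem.List.pyGet? optimized_code (p.1 + 1) then acc
      else acc ++ [p.2]
    | none => acc ++ [p.2]   -- Python: IndexError; excluded by Pre_
  else acc ++ [p.2]

def optimize_ir (ir_code : List String) : List String :=
  let optimized_code := ir_code.foldl pvStepA []
  (PySem.List.enumerate optimized_code).foldl (pvStepA2 optimized_code) []

-- ===== PORT B =====
-- B's lookback emit: pop a trailing redundant goto, then append the line
def pvStepB (result : List String) (out : String) : List String :=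
  (match PySem.List.pyGet? result (-1) with
   | some last =>
     if PySem.Str.isIn "goto" last then
       match PySem.List.pyGet? ((PySem.Str.split? last " ").getD []) 1 with
       | some t => if PySem.Str.join "" [t, ":"] = out then result.dropLast else result
       | none => result   -- Python: IndexError; excluded by Pre_
     else result
   | none => result) ++ [out]

-- B's per-line step: transform the line, skip self-assignments, emit via pvStepB
def pvStepBLine (result : List String) (line : String) : List String :=
  if PySem.Str.isIn " = " line then
    match (PySem.Str.split? line " = ").getD [] with
    | [lhs, rhs] =>
      if PySem.Str.strIsdigit rhs then pvStepB result (PySem.Str.join "" [lhs, " = ", rhs])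
      else if PySem.Str.isIn lhs rhs then result       -- continue
      else pvStepB result line
    | _ => result     -- Python: ValueError; excluded by Pre_
  else pvStepB result line

def optimize_ir_alt (ir_code : List String) : List String :=
  ir_code.foldl pvStepBLine []

-- ===== PRECONDITION & SPEC =====
-- helpers for Pre_: a line containing "goto" but no space, and a line the first pass drops
def pvGotoNoSpace (s : String) : Bool :=
  PySem.Str.isIn "goto" s && !PySem.Str.isIn " " s
def pvSelfAssignDropped (s : String) : Bool :=
  PySem.Str.isIn " = " s &&
    match (PySem.Str.split? s " = ").getD [] with
    | [lhs, rhs] => !PySem.Str.strIsdigit rhs && PySem.Str.isIn lhs rhs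
    | _ => false
-- Pre_ is exactly the inputs on which A returns normally: no line with two or more " = "
-- (ValueError at unpacking), and a line containing "goto" but no space (whose split(" ")[1]
-- raises IndexError when another line follows it in the intermediate list) only if every
-- later line is a dropped self-assignment.
def Pre_optimize_ir (ir_code : List String) : Prop :=
  (∀ line ∈ ir_code, PySem.Str.count line " = " ≤ 1) ∧
  List.Pairwise (fun a b => pvGotoNoSpace a = true → pvSelfAssignDropped b = true) ir_code
instance (ir_code : List String) : Decidable (Pre_optimize_ir ir_code) := by
  unfold Pre_optimize_ir; infer_instance
def pvWitness_optimize_ir : List String :=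
  ["t1 = 5", "goto L1", "L1:", "x = y + 1", "a = a + 1"]
def Spec_optimize_ir (ir_code : List String) (out : List String) : Prop := out = optimize_ir_alt ir_code
instance (ir_code : List String) (out : List String) : Decidable (Spec_optimize_ir ir_code out) := by unfold Spec_optimize_ir; infer_instance

-- ===== CLAIM (what is proved, stated in full; the proofs are below) =====
def Claim_equal_optimize_ir : Prop := ∀ (ir_code : List String), Dom_optimize_ir ir_code → Pre_optimize_ir ir_code → Spec_optimize_ir ir_code (optimize_ir ir_code)

-- ===== LEMMAS AND PROOFS =====

-- the per-line transform both passes-1 share (none = the line is dropped / A raises)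
def pvTf (line : String) : Option String :=
  if PySem.Str.isIn " = " line then
    match (PySem.Str.split? line " = ").getD [] with
    | [lhs, rhs] =>
      if PySem.Str.strIsdigit rhs then some (PySem.Str.join "" [lhs, " = ", rhs])
      else if PySem.Str.isIn lhs rhs then none
      else some line
    | _ => none
  else some line

-- "x is a goto jumping exactly to the label line y"
def pvGm (x y : String) : Bool :=
  PySem.Str.isIn "goto" x &&
    match PySem.List.pyGet? ((PySem.Str.split? x " ").getD []) 1 with
    | some t => PySem.Str.join "" [t, ":"] == y
    | none => false

-- A's second pass as a structural recursion (lookahead on the next element)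
def pvR : List String → List String
  | [] => []
  | [x] => [x]
  | x :: y :: rest => if pvGm x y then pvR (y :: rest) else x :: pvR (y :: rest)

theorem pvStepA_tf (acc : List String) (line : String) :
    pvStepA acc line = match pvTf line with | some o => acc ++ [o] | none => acc := by
  unfold pvStepA pvTf
  repeat' split <;> try rfl

theorem pvFoldA_tf (l : List String) : ∀ acc : List String,
    l.foldl pvStepA acc = acc ++ l.filterMap pvTf := by
  induction l with
  | nil => simp
  | cons x l ih =>
    intro acc
    rw [List.foldl_cons, pvStepA_tf]
    cases h : pvTf x <;> simp [h, ih, List.append_assoc]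

theorem pvStepBLine_tf (r : List String) (line : String) :
    pvStepBLine r line = match pvTf line with | some o => pvStepB r o | none => r := by
  unfold pvStepBLine pvTf
  repeat' split <;> try rfl

theorem pvFoldB_tf (l : List String) : ∀ r : List String,
    l.foldl pvStepBLine r = (l.filterMap pvTf).foldl pvStepB r := by
  induction l with
  | nil => simp
  | cons x l ih =>
    intro r
    rw [List.foldl_cons, pvStepBLine_tf]
    cases h : pvTf x <;> simp [h, ih]

theorem pvStepB_ne_nil (r : List String) (o : String) : pvStepB r o ≠ [] := by
  unfold pvStepB; simp

theorem pvStepB_eval (X : List String) (a o : String)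
    (hX : PySem.List.pyGet? X (-1) = some a) :
    pvStepB X o = (if pvGm a o then X.dropLast else X) ++ [o] := by
  unfold pvStepB
  rw [hX]
  show (if PySem.Str.isIn "goto" a = true then
      match PySem.List.pyGet? ((PySem.Str.split? a " ").getD []) 1 with
      | some t => if PySem.Str.join "" [t, ":"] = o then X.dropLast else X
      | none => X
    else X) ++ [o] = (if pvGm a o then X.dropLast else X) ++ [o]
  unfold pvGm
  cases hI : PySem.Str.isIn "goto" a
  · simp
  · simp only [if_true, Bool.true_and]
    cases hT : PySem.List.pyGet? ((PySem.Str.split? a " ").getD []) 1 with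
    | none => simp
    | some t =>
      by_cases he : PySem.Str.join "" [t, ":"] = o
      · simp [he]
      · simp [he]

theorem pvStepB_shift (acc r : List String) (o : String) (h : r ≠ []) :
    pvStepB (acc ++ r) o = acc ++ pvStepB r o := by
  obtain h' | ⟨r', a, rfl⟩ := List.eq_nil_or_concat r
  · exact absurd h' h
  have h1 : PySem.List.pyGet? (acc ++ r'.concat a) (-1) = some a := by
    simp [List.concat_eq_append, ← List.append_assoc]
  have h2 : PySem.List.pyGet? (r'.concat a) (-1) = some a := by
    simp [List.concat_eq_append]
  rw [pvStepB_eval _ a o h1, pvStepB_eval _ a o h2]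
  by_cases hg : pvGm a o
  · simp [hg]
  · simp [hg, List.concat_eq_append, List.append_assoc]

theorem pvFoldB_shift (l : List String) : ∀ (acc r : List String), r ≠ [] →
    l.foldl pvStepB (acc ++ r) = acc ++ l.foldl pvStepB r := by
  induction l with
  | nil => intro acc r _; simp
  | cons o l ih =>
    intro acc r h
    rw [List.foldl_cons, List.foldl_cons, pvStepB_shift acc r o h,
        ih acc (pvStepB r o) (pvStepB_ne_nil r o)]

theorem pvStepB_single (x y : String) :
    pvStepB [x] y = if pvGm x y then [y] else [x, y] := by
  have h1 : PySem.List.pyGet? [x] (-1) = some x := by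
    simpa using PySem.List.pyGet?_neg_one_append_singleton (xs := ([] : List String)) (x := x)
  rw [pvStepB_eval [x] x y h1]
  by_cases hg : pvGm x y <;> simp [hg]

theorem pvFoldB_R (l : List String) : ∀ x : String, l.foldl pvStepB [x] = pvR (x :: l) := by
  induction l with
  | nil => intro x; simp [pvR]
  | cons y l ih =>
    intro x
    rw [List.foldl_cons, pvStepB_single]
    cases hg : pvGm x y
    · simp only [Bool.false_eq_true, if_false]
      have h2 : ([x, y] : List String) = [x] ++ [y] := rfl
      rw [h2, pvFoldB_shift l [x] [y] (by simp), ih y]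
      simp [pvR, hg]
    · simp only [if_true]
      rw [ih y]
      simp [pvR, hg]

theorem pvFoldB_R0 (l : List String) : l.foldl pvStepB [] = pvR l := by
  cases l with
  | nil => rfl
  | cons x l =>
    rw [List.foldl_cons]
    have h0 : pvStepB [] x = [x] := by unfold pvStepB; rfl
    rw [h0, pvFoldB_R]

theorem pvA2_aux (opt : List String) (l : List String) : ∀ (k : Nat) (acc : List String),
    opt.drop k = l →
    (PySem.List.enumerate l (k : Int)).foldl (pvStepA2 opt) acc = acc ++ pvR l := by
  induction l with
  | nil => intro k acc _; simp [PySem.List.enumerate_nil, pvR]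
  | cons x l ih =>
    intro k acc h
    have hk : k < opt.length := by
      by_contra hle
      rw [List.drop_eq_nil_of_le (by omega)] at h
      exact List.cons_ne_nil x l h.symm
    have hlen : opt.length = k + 1 + l.length := by
      have := congrArg List.length h
      simp [List.length_drop] at this
      omega
    have hdrop' : opt.drop (k + 1) = l := by
      have h2 : opt.drop (k + 1) = (opt.drop k).drop 1 := by
        rw [List.drop_drop]
      rw [h2, h]
      rfl
    have hget : PySem.List.pyGet? opt ((k : Int) + 1) = l[0]? := by
      have hc : ((k : Int) + 1) = ((k + 1 : Nat) : Int) := by push_cast; ring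
      rw [hc, PySem.List.pyGet?_natCast]
      rw [← hdrop']
      simp [List.getElem?_drop]
    rw [PySem.List.enumerate_cons, List.foldl_cons]
    cases l with
    | nil =>
      have hstep : pvStepA2 opt acc ((k : Int), x) = acc ++ [x] := by
        unfold pvStepA2
        rw [if_neg]
        rintro ⟨-, h2⟩
        rw [hlen] at h2
        push_cast [List.length_nil] at h2
        omega
      rw [hstep]
      simp [PySem.List.enumerate_nil, pvR]
    | cons y l' =>
      have hget' : PySem.List.pyGet? opt ((k : Int) + 1) = some y := by
        rw [hget]; rfl
      have hcond : ((k : Int) + 1 < (opt.length : Int)) := by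
        rw [hlen]; push_cast [List.length_cons]; omega
      have hstep : pvStepA2 opt acc ((k : Int), x) =
          if pvGm x y then acc else acc ++ [x] := by
        unfold pvStepA2 pvGm
        cases hI : PySem.Str.isIn "goto" x
        · rw [if_neg (by rintro ⟨h1, -⟩; exact Bool.false_ne_true h1)]
          simp
        · rw [if_pos ⟨rfl, hcond⟩]
          cases hT : PySem.List.pyGet? ((PySem.Str.split? x " ").getD []) 1 with
          | none => simp
          | some t =>
            rw [hget']
            by_cases he : PySem.Str.join "" [t, ":"] = y
            · simp [he]
            · simp [he]
      rw [hstep]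
      have hrec := ih (k + 1) ((if pvGm x y then acc else acc ++ [x])) hdrop'
      have hc : ((k : Int) + 1) = ((k + 1 : Nat) : Int) := by push_cast; ring
      rw [hc, hrec]
      by_cases hg : pvGm x y = true
      · simp [pvR, hg]
      · simp [pvR, hg, List.append_assoc]

theorem pvA_eq_R (ir : List String) :
    optimize_ir ir = pvR (ir.filterMap pvTf) := by
  unfold optimize_ir
  rw [pvFoldA_tf, List.nil_append]
  have h := pvA2_aux (ir.filterMap pvTf) (ir.filterMap pvTf) 0 [] rfl
  simpa using h

theorem optimize_ir_spec : Claim_equal_optimize_ir := by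
  intro ir _ _
  unfold Spec_optimize_ir
  rw [pvA_eq_R, optimize_ir_alt, pvFoldB_tf, pvFoldB_R0]
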